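-- pv_equiv track=rewrite | github.com/BigSickMind/frequency-analysis | src/logic/analysis.py | gssnr_analysis
-- ===== SOURCE A (Python) =====
-- def gssnr_analysis(GSSNR_blocks):
--     GSSNR_blocks = GSSNR_blocks[6:]
--     flag = True
--     model = []
--     for i in range(1, len(GSSNR_blocks)):
--         if not flag:
--             if GSSNR_blocks[i] - GSSNR_blocks[i - 1] <= 0:
--                 continue
--             elif GSSNR_blocks[i] - GSSNR_blocks[i - 1] > 0:
--                 model.append('min')
--                 flag = True
--         else:
--             if GSSNR_blocks[i] - GSSNR_blocks[i - 1] >= 0: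
--                 continue
--             elif GSSNR_blocks[i] - GSSNR_blocks[i - 1] < 0:
--                 model.append('max')
--                 flag = False
--     if len(model) >= 3 and model[0] == 'max' and model[1] == 'min' and model[len(model) - 1] == 'max':
--         return True
--     else:
--         return False
-- ===== SOURCE B (Python) =====
-- def gssnr_analysis(GSSNR_blocks):
--     xs = GSSNR_blocks[6:]
--     # signs of consecutive differences, zeros (flat steps) dropped
--     signs = [(1 if b > a else -1) for a, b in zip(xs, xs[1:]) if b != a]
--     # ignore everything before the first strict decrease
--     while signs and signs[0] > 0:
--         signs = signs[1:]
--     # count maximal same-sign runs (= number of alternations A records)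
--     runs, prev = 0, 0
--     for s in signs:
--         if s != prev:
--             runs, prev = runs + 1, s
--     # A's label list alternates max,min,...: accepted iff >= 3 runs and odd count
--     return runs >= 3 and runs % 2 == 1
-- ===== Notes on version B (the rewrite author's own statement) =====
-- stated objective: idiomatic
-- what changed: Replaces A's stateful flag/label-list scan and four-way final label check by a precompute pass: map consecutive differences to nonzero signs, drop everything before the first strict decrease, count maximal same-sign runs, and accept iff the run count is >= 3 and odd.
import Mathlib
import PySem

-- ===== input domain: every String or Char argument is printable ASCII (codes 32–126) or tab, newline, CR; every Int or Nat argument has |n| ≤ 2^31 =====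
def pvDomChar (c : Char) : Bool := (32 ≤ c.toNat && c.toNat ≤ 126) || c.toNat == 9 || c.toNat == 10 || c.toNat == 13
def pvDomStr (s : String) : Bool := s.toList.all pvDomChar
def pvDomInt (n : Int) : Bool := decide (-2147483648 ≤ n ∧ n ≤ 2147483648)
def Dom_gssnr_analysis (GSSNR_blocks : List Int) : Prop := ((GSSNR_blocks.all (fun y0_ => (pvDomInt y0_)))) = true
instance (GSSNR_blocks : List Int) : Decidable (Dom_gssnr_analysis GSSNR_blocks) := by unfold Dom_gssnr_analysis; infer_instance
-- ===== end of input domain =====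

-- B replaces A's stateful flag/label-list scan by sign-list precomputation + run counting (idiomatic decomposition, same cost).

-- ===== PORT A =====
def gssnr_analysis (GSSNR_blocks : List Int) : Bool :=
  let xs := PySem.List.slice GSSNR_blocks (some 6) none
  let st := (PySem.List.pyRange 1 (xs.length : Int) 1).foldl
    (fun (st : Bool × List String) i =>
      if !st.1 then
        if PySem.List.pyGetD xs i 0 - PySem.List.pyGetD xs (i - 1) 0 ≤ 0 then st
        else if PySem.List.pyGetD xs i 0 - PySem.List.pyGetD xs (i - 1) 0 > 0 then
          (true, st.2 ++ ["min"])
        else st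
      else
        if PySem.List.pyGetD xs i 0 - PySem.List.pyGetD xs (i - 1) 0 ≥ 0 then st
        else if PySem.List.pyGetD xs i 0 - PySem.List.pyGetD xs (i - 1) 0 < 0 then
          (false, st.2 ++ ["max"])
        else st)
    (true, ([] : List String))
  let model := st.2
  if decide (3 ≤ model.length) && (PySem.List.pyGetD model 0 "" == "max")
      && (PySem.List.pyGetD model 1 "" == "min")
      && (PySem.List.pyGetD model ((model.length : Int) - 1) "" == "max") then
    true
  else
    false

-- ===== PORT B =====
def dropLeadingPos : List Int → List Int
  | [] => []
  | s :: rest => if s > 0 then dropLeadingPos rest else s :: rest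

def gssnr_analysis_alt (GSSNR_blocks : List Int) : Bool :=
  let xs := PySem.List.slice GSSNR_blocks (some 6) none
  let signs := (xs.zip (PySem.List.slice xs (some 1) none)).filterMap
    (fun p => if p.2 ≠ p.1 then some (if p.2 > p.1 then (1 : Int) else -1) else none)
  let signs := dropLeadingPos signs
  let rp := signs.foldl (fun (rp : Int × Int) s => if s ≠ rp.2 then (rp.1 + 1, s) else rp) (0, 0)
  decide (3 ≤ rp.1 ∧ rp.1 % 2 = 1)

-- ===== PRECONDITION & SPEC =====
def Spec_gssnr_analysis (GSSNR_blocks : List Int) (out : Bool) : Prop := out = gssnr_analysis_alt GSSNR_blocks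
instance (GSSNR_blocks : List Int) (out : Bool) : Decidable (Spec_gssnr_analysis GSSNR_blocks out) := by unfold Spec_gssnr_analysis; infer_instance

-- ===== CLAIM (what is proved, stated in full; the proofs are below) =====
def Claim_equal_gssnr_analysis : Prop := ∀ (GSSNR_blocks : List Int), Dom_gssnr_analysis GSSNR_blocks → Spec_gssnr_analysis GSSNR_blocks (gssnr_analysis GSSNR_blocks)

-- ===== LEMMAS AND PROOFS =====

-- A's loop body as a function of the pair (xs[i-1], xs[i])
def stepPair (st : Bool × List String) (p : Int × Int) : Bool × List String :=
  if !st.1 then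
    if p.2 - p.1 ≤ 0 then st
    else if p.2 - p.1 > 0 then (true, st.2 ++ ["min"]) else st
  else
    if p.2 - p.1 ≥ 0 then st
    else if p.2 - p.1 < 0 then (false, st.2 ++ ["max"]) else st

-- the alternating label list A builds
def altList (k : Nat) : List String := (List.range k).map (fun j => if j % 2 = 0 then "max" else "min")

def canonSt (k : Nat) : Bool × List String := (decide (k % 2 = 0), altList k)

def sgn (d : Int) : Int := if d < 0 then -1 else if 0 < d then 1 else 0

def runCount (exp : Int) : List Int → Nat
  | [] => 0
  | s :: ss => if s = exp then runCount (-exp) ss + 1 else runCount exp ss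

def expSign (k : Nat) : Int := if k % 2 = 0 then -1 else 1

lemma altList_succ (k : Nat) : altList (k + 1) = altList k ++ [if k % 2 = 0 then "max" else "min"] := by
  simp [altList, List.range_succ]

lemma altList_length (k : Nat) : (altList k).length = k := by simp [altList]

-- A's indexed loop over range(1, len xs) is the fold of its body over consecutive pairs
lemma fold_pairs {St : Type} (xs : List Int) (f : St → Int × Int → St) :
    ∀ (n j : Nat) (st : St), xs.length - j = n → 1 ≤ j →
    (PySem.List.pyRange (j : Int) (xs.length : Int) 1).foldl
      (fun st i => f st (PySem.List.pyGetD xs (i - 1) 0, PySem.List.pyGetD xs i 0)) st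
    = ((xs.drop (j - 1)).zip (xs.drop j)).foldl f st := by
  intro n
  induction n with
  | zero =>
      intro j st hn hj
      rw [PySem.List.pyRange_one_eq_nil (by omega)]
      have hz : xs.drop j = [] := List.drop_eq_nil_of_le (by omega)
      simp [hz]
  | succ m ih =>
      intro j st hn hj
      have hjl : j < xs.length := by omega
      rw [PySem.List.pyRange_one_cons (by exact_mod_cast hjl), List.foldl_cons]
      have h1 : ((j : Int) - 1) = ((j - 1 : Nat) : Int) := by omega
      have hg1 : PySem.List.pyGetD xs ((j : Int) - 1) 0 = xs[j - 1] := by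
        rw [h1, PySem.List.pyGetD_natCast]; exact List.getD_eq_getElem xs 0 (by omega)
      have hg2 : PySem.List.pyGetD xs (j : Int) 0 = xs[j] := by
        rw [PySem.List.pyGetD_natCast]; exact List.getD_eq_getElem xs 0 hjl
      have hd1 : xs.drop (j - 1) = xs[j - 1] :: xs.drop j := by
        rw [List.drop_eq_getElem_cons (show j - 1 < xs.length by omega)]
        congr 2
        omega
      have hd2 : xs.drop j = xs[j] :: xs.drop (j + 1) := List.drop_eq_getElem_cons hjl
      rw [hd1]
      nth_rewrite 2 [hd2]
      rw [List.zip_cons_cons, List.foldl_cons]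
      have hcast : ((j : Int) + 1) = ((j + 1 : Nat) : Int) := by omega
      rw [hg1, hg2, hcast, ih (j + 1) (f st (xs[j - 1], xs[j])) (by omega) (by omega)]
      rw [show j + 1 - 1 = j from rfl, hd2]

-- the pair fold from the canonical state lands in the canonical state, counting runs
lemma pairFold_eval : ∀ (ps : List (Int × Int)) (k : Nat),
    ps.foldl stepPair (canonSt k)
    = canonSt (k + runCount (expSign k) (ps.map (fun p => sgn (p.2 - p.1)))) := by
  intro ps
  induction ps with
  | nil => intro k; simp [runCount]
  | cons p ps ih =>
      intro k
      rw [List.foldl_cons, List.map_cons]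
      by_cases hk : k % 2 = 0
      · have e1 : expSign k = -1 := by simp [expSign, hk]
        rcases lt_trichotomy (p.2 - p.1) 0 with hd | hd | hd
        · -- strict decrease while expecting one: a 'max' is appended
          have hlt : p.2 < p.1 := by omega
          have hnle : ¬ p.1 ≤ p.2 := by omega
          have hs : sgn (p.2 - p.1) = -1 := by simp [sgn, hd]
          have h1 : (k + 1) % 2 ≠ 0 := by omega
          have e2 : expSign (k + 1) = 1 := by simp [expSign, h1]
          have hge : ¬ (p.2 - p.1 ≥ 0) := not_le.mpr hd
          have hstep : stepPair (canonSt k) p = canonSt (k + 1) := by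
            simp [stepPair, canonSt, hk, hge, hd, hlt, hnle, altList_succ, h1]
          rw [hstep, ih (k + 1), e2, hs, e1]
          norm_num [runCount]
          congr 1
          omega
        · have hs : sgn (p.2 - p.1) = 0 := by simp [sgn, hd]
          have hle : p.2 - p.1 ≥ 0 := by omega
          have hstep : stepPair (canonSt k) p = canonSt k := by
            simp [stepPair, canonSt, hk]
            all_goals omega
          rw [hstep, ih k, hs, e1]
          simp only [runCount, if_neg (by norm_num : (0 : Int) ≠ -1)]
        · have hlt : p.1 < p.2 := by omega
          have hs : sgn (p.2 - p.1) = 1 := by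
            simp [sgn, hd, not_lt.mpr (le_of_lt hd), hlt]
          have hstep : stepPair (canonSt k) p = canonSt k := by
            simp [stepPair, canonSt, hk]
            all_goals omega
          rw [hstep, ih k, hs, e1]
          simp only [runCount, if_neg (by norm_num : (1 : Int) ≠ -1)]
      · have e1 : expSign k = 1 := by simp [expSign, hk]
        rcases lt_trichotomy (p.2 - p.1) 0 with hd | hd | hd
        · have hs : sgn (p.2 - p.1) = -1 := by simp [sgn, hd]
          have hle : p.2 - p.1 ≤ 0 := le_of_lt hd
          have hstep : stepPair (canonSt k) p = canonSt k := by
            simp [stepPair, canonSt, hk, hle]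
          rw [hstep, ih k, hs, e1]
          simp only [runCount, if_neg (by norm_num : (-1 : Int) ≠ 1)]
        · have hs : sgn (p.2 - p.1) = 0 := by simp [sgn, hd]
          have hle : p.2 - p.1 ≤ 0 := by omega
          have hstep : stepPair (canonSt k) p = canonSt k := by
            simp [stepPair, canonSt, hk, hle]
          rw [hstep, ih k, hs, e1]
          simp only [runCount, if_neg (by norm_num : (0 : Int) ≠ 1)]
        · -- strict increase while expecting one: a 'min' is appended
          have hlt : p.1 < p.2 := by omega
          have hnle : ¬ p.2 ≤ p.1 := by omega
          have hs : sgn (p.2 - p.1) = 1 := by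
            simp [sgn, hd, not_lt.mpr (le_of_lt hd), hlt]
          have h1 : (k + 1) % 2 = 0 := by omega
          have e2 : expSign (k + 1) = -1 := by simp [expSign, h1]
          have hstep : stepPair (canonSt k) p = canonSt (k + 1) := by
            simp [stepPair, canonSt, hk, hnle, hd, hlt, altList_succ, h1]
          rw [hstep, ih (k + 1), e2, hs, e1]
          norm_num [runCount]
          congr 1
          omega

-- A's final four-way check on the alternating label list is exactly "k ≥ 3 and k odd"
lemma finalCheck_altList (k : Nat) :
    (if decide (3 ≤ (altList k).length) && (PySem.List.pyGetD (altList k) 0 "" == "max")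
        && (PySem.List.pyGetD (altList k) 1 "" == "min")
        && (PySem.List.pyGetD (altList k) (((altList k).length : Int) - 1) "" == "max") then
      true else false)
    = decide (3 ≤ k ∧ k % 2 = 1) := by
  match k with
  | 0 => decide
  | 1 => decide
  | 2 => decide
  | (m + 3) =>
      have hlen := altList_length (m + 3)
      have hg0 : PySem.List.pyGetD (altList (m + 3)) 0 "" = "max" := by
        rw [PySem.List.pyGetD_zero]
        simp [altList, List.getD, List.range_succ_eq_map]
      have hg1 : PySem.List.pyGetD (altList (m + 3)) 1 "" = "min" := by
        rw [show (1 : Int) = ((1 : Nat) : Int) from rfl, PySem.List.pyGetD_natCast]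
        simp [altList, List.getD, List.range_succ_eq_map]
      have hgl : PySem.List.pyGetD (altList (m + 3)) (((altList (m + 3)).length : Int) - 1) ""
          = (if (m + 2) % 2 = 0 then "max" else "min") := by
        rw [hlen, show ((m + 3 : Nat) : Int) - 1 = ((m + 2 : Nat) : Int) by omega,
          PySem.List.pyGetD_natCast]
        have : m + 2 < (altList (m + 3)).length := by rw [hlen]; omega
        rw [List.getD_eq_getElem _ _ this]
        simp [altList]
      rw [hg0, hg1, hgl, hlen]
      by_cases hm : (m + 2) % 2 = 0
      · rw [if_pos hm]
        have h1 : (3 ≤ m + 3 ∧ (m + 3) % 2 = 1) := by constructor <;> omega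
        simp [h1]
      · rw [if_neg hm]
        have h1 : ¬ (3 ≤ m + 3 ∧ (m + 3) % 2 = 1) := by omega
        simp [h1]
        omega

-- zeros are never counted, so filtering them away preserves the run count
lemma runCount_filterMap (ps : List (Int × Int)) :
    ∀ exp : Int, exp = 1 ∨ exp = -1 →
    runCount exp (ps.map (fun p => sgn (p.2 - p.1)))
    = runCount exp (ps.filterMap (fun p => if p.2 ≠ p.1 then some (if p.2 > p.1 then (1 : Int) else -1) else none)) := by
  induction ps with
  | nil => intro exp _; rfl
  | cons p ps ih =>
      intro exp hexp
      rcases lt_trichotomy (p.2 - p.1) 0 with hd | hd | hd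
      · have hne : p.2 ≠ p.1 := by intro h; omega
        have hng : ¬ p.1 < p.2 := by omega
        have hs : sgn (p.2 - p.1) = -1 := by simp [sgn, hd]
        have hfm : List.filterMap (fun p : Int × Int => if p.2 ≠ p.1 then some (if p.2 > p.1 then (1 : Int) else -1) else none) (p :: ps)
            = -1 :: List.filterMap (fun p : Int × Int => if p.2 ≠ p.1 then some (if p.2 > p.1 then (1 : Int) else -1) else none) ps := by
          rw [List.filterMap_cons]
          simp [hne, hng]
        rw [List.map_cons, hs, hfm]
        by_cases he : (-1 : Int) = exp
        · simp only [runCount, if_pos he, ih (-exp) (by rcases hexp with h | h <;> simp [h])]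
        · simp only [runCount, if_neg he, ih exp hexp]
      · have heq : p.2 = p.1 := by omega
        have hs : sgn (p.2 - p.1) = 0 := by simp [sgn, hd]
        have hz : (0 : Int) ≠ exp := by rcases hexp with h | h <;> simp [h]
        have hfm : List.filterMap (fun p : Int × Int => if p.2 ≠ p.1 then some (if p.2 > p.1 then (1 : Int) else -1) else none) (p :: ps)
            = List.filterMap (fun p : Int × Int => if p.2 ≠ p.1 then some (if p.2 > p.1 then (1 : Int) else -1) else none) ps := by
          rw [List.filterMap_cons]
          simp [heq]
        rw [List.map_cons, hs, hfm]
        simp only [runCount, if_neg hz, ih exp hexp]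
      · have hne : p.2 ≠ p.1 := by intro h; omega
        have hg : p.1 < p.2 := by omega
        have hs : sgn (p.2 - p.1) = 1 := by
          simp [sgn, not_lt.mpr (le_of_lt hd)]
          omega
        have hfm : List.filterMap (fun p : Int × Int => if p.2 ≠ p.1 then some (if p.2 > p.1 then (1 : Int) else -1) else none) (p :: ps)
            = 1 :: List.filterMap (fun p : Int × Int => if p.2 ≠ p.1 then some (if p.2 > p.1 then (1 : Int) else -1) else none) ps := by
          rw [List.filterMap_cons]
          simp [hne, hg]
        rw [List.map_cons, hs, hfm]
        by_cases he : (1 : Int) = exp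
        · simp only [runCount, if_pos he, ih (-exp) (by rcases hexp with h | h <;> simp [h])]
        · simp only [runCount, if_neg he, ih exp hexp]

lemma runCount_dropLeadingPos (l : List Int) :
    runCount (-1) l = runCount (-1) (dropLeadingPos l) := by
  induction l with
  | nil => rfl
  | cons s rest ih =>
      by_cases h : s > 0
      · have hne : s ≠ -1 := by omega
        simp only [dropLeadingPos, if_pos h, runCount, if_neg hne]
        exact ih
      · simp [dropLeadingPos, h]

lemma mem_dropLeadingPos {l : List Int} {x : Int} (h : x ∈ dropLeadingPos l) : x ∈ l := by
  induction l with
  | nil => simpa [dropLeadingPos] using h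
  | cons s rest ih =>
      by_cases hs : s > 0
      · simp only [dropLeadingPos, if_pos hs] at h
        exact List.mem_cons_of_mem _ (ih h)
      · simpa [dropLeadingPos, hs] using h

lemma dropLeadingPos_head {l : List Int} {s : Int} {rest : List Int}
    (h : dropLeadingPos l = s :: rest) : ¬ s > 0 := by
  induction l with
  | nil => simp [dropLeadingPos] at h
  | cons a l ih =>
      by_cases ha : a > 0
      · exact ih (by simpa [dropLeadingPos, ha] using h)
      · simp only [dropLeadingPos, if_neg ha, List.cons.injEq] at h
        omega

-- B's run-counting fold computes runCount
lemma bFold_eval : ∀ (l : List Int), (∀ x ∈ l, x = 1 ∨ x = -1) →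
    ∀ (r p : Int), p = 1 ∨ p = -1 →
    (l.foldl (fun (rp : Int × Int) s => if s ≠ rp.2 then (rp.1 + 1, s) else rp) (r, p)).1
    = r + (runCount (-p) l : Int) := by
  intro l
  induction l with
  | nil => intro _ r p _; simp [runCount]
  | cons s rest ih =>
      intro hmem r p hp
      have hs := hmem s List.mem_cons_self
      have hrest := fun x hx => hmem x (List.mem_cons_of_mem _ hx)
      by_cases hne : s = p
      · subst hne
        have hskip : s ≠ -s := by rcases hs with h | h <;> omega
        have h1 : (if s ≠ s then (r + 1, s) else (r, s)) = (r, s) := by simp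
        rw [List.foldl_cons]
        simp only [h1, runCount, if_neg hskip]
        exact ih hrest r s hs
      · have hsp : s = -p := by rcases hs with h | h <;> rcases hp with h2 | h2 <;> omega
        have hrc : runCount (-p) (s :: rest) = runCount p rest + 1 := by
          simp [runCount, hsp]
        rw [hrc, List.foldl_cons]
        have h2 : (if s ≠ p then (r + 1, s) else (r, p)) = (r + 1, -p) := by
          rw [if_pos hne, hsp]
        simp only [h2]
        rw [ih hrest (r + 1) (-p) (by rcases hp with h | h <;> simp [h])]
        push_cast
        ring

-- the run count both programs compute, as a function of the sliced list
def pairsK (xs : List Int) : Nat :=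
  runCount (-1) ((xs.zip xs.tail).map (fun p => sgn (p.2 - p.1)))

lemma mem_signs {xs : List Int} {x : Int}
    (h : x ∈ (xs.zip xs.tail).filterMap
      (fun p => if p.2 ≠ p.1 then some (if p.2 > p.1 then (1 : Int) else -1) else none)) :
    x = 1 ∨ x = -1 := by
  rcases List.mem_filterMap.mp h with ⟨p, _, hp⟩
  by_cases hne : p.2 = p.1
  · simp [hne] at hp
  · simp only [if_pos hne, Option.some.injEq] at hp
    by_cases hg : p.2 > p.1
    · left; rw [← hp]; simp [hg]
    · right; rw [← hp]; simp [hg]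

lemma A_eval (g : List Int) :
    gssnr_analysis g
    = decide (3 ≤ pairsK (PySem.List.slice g (some 6) none)
        ∧ pairsK (PySem.List.slice g (some 6) none) % 2 = 1) := by
  unfold gssnr_analysis
  set xs := PySem.List.slice g (some 6) none with hxs
  simp only [letFun]
  have h1 : (PySem.List.pyRange (1 : Int) (xs.length : Int) 1).foldl
      (fun (st : Bool × List String) i =>
        if !st.1 then
          if PySem.List.pyGetD xs i 0 - PySem.List.pyGetD xs (i - 1) 0 ≤ 0 then st
          else if PySem.List.pyGetD xs i 0 - PySem.List.pyGetD xs (i - 1) 0 > 0 then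
            (true, st.2 ++ ["min"])
          else st
        else
          if PySem.List.pyGetD xs i 0 - PySem.List.pyGetD xs (i - 1) 0 ≥ 0 then st
          else if PySem.List.pyGetD xs i 0 - PySem.List.pyGetD xs (i - 1) 0 < 0 then
            (false, st.2 ++ ["max"])
          else st) (true, ([] : List String))
      = ((xs.drop 0).zip (xs.drop 1)).foldl stepPair (true, ([] : List String)) :=
    fold_pairs xs stepPair (xs.length - 1) 1 (true, ([] : List String)) rfl (le_refl 1)
  rw [h1, List.drop_zero, List.drop_one,
    show ((true, ([] : List String)) : Bool × List String) = canonSt 0 from rfl,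
    pairFold_eval, show expSign 0 = -1 from rfl, Nat.zero_add]
  exact finalCheck_altList _

lemma B_eval (g : List Int) :
    gssnr_analysis_alt g
    = decide (3 ≤ pairsK (PySem.List.slice g (some 6) none)
        ∧ pairsK (PySem.List.slice g (some 6) none) % 2 = 1) := by
  unfold gssnr_analysis_alt
  set xs := PySem.List.slice g (some 6) none with hxs
  simp only [letFun]
  rw [PySem.List.slice_from_one]
  set signs0 := (xs.zip xs.tail).filterMap
    (fun p => if p.2 ≠ p.1 then some (if p.2 > p.1 then (1 : Int) else -1) else none) with hs0
  have hK : pairsK xs = runCount (-1) (dropLeadingPos signs0) := by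
    rw [pairsK, runCount_filterMap _ (-1) (Or.inr rfl), ← hs0, runCount_dropLeadingPos]
  rcases hdl : dropLeadingPos signs0 with _ | ⟨s, rest⟩
  · simp only [List.foldl_nil]
    rw [hK, hdl]
    norm_num [runCount]
  · have hsmem : s ∈ signs0 := mem_dropLeadingPos (hdl ▸ List.mem_cons_self)
    have hs1 : s = 1 ∨ s = -1 := mem_signs (hs0 ▸ hsmem)
    have hsn : ¬ s > 0 := dropLeadingPos_head hdl
    have hsm1 : s = -1 := by rcases hs1 with h | h <;> omega
    have hrestmem : ∀ x ∈ rest, x = 1 ∨ x = -1 := by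
      intro x hx
      exact mem_signs (hs0 ▸ mem_dropLeadingPos (hdl ▸ List.mem_cons_of_mem _ hx))
    rw [List.foldl_cons]
    have hstep0 : (if s ≠ (0 : Int) then ((0 : Int) + 1, s) else ((0 : Int), (0 : Int))) = (1, -1) := by
      rw [if_pos (by omega), hsm1]
      norm_num
    simp only [hstep0]
    rw [bFold_eval rest hrestmem 1 (-1) (Or.inr rfl)]
    rw [hK, hdl]
    have hrc : runCount (-1) (s :: rest) = runCount 1 rest + 1 := by
      simp [runCount, hsm1]
    rw [hrc]
    simp only [decide_eq_decide, neg_neg]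
    omega

-- ===== VERDICT (by name: the statement is the Claim_ definition above) =====
theorem gssnr_analysis_spec : Claim_equal_gssnr_analysis := by
  intro GSSNR_blocks _
  unfold Spec_gssnr_analysis
  rw [A_eval, B_eval]
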